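-- pv_equiv track=rewrite | github.com/thanosmoschou/To_Vivlio_Ths_Python | Chapter 10/ex24ch10.py | func
-- ===== SOURCE A (Python) =====
-- def func(num):
--     palind = True
--     numList = []
--
--     while True: #spao ton arithmo mou kai vazo ta psifia se lista
--         if num % 10 == 0 and num // 10 == 0:
--             break
--         else:
--             numList.append(num % 10)
--             num = num // 10
--
--     for i in range(len(numList) // 2):
--         if numList[i] != numList[len(numList) - 1 - i]:
--             palind = False
--             break
--
--     return palind
-- ===== SOURCE B (Python) =====
-- def func(num):
--     rev = 0
--     n = num
--     while True:
--         if n % 10 == 0 and n // 10 == 0: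
--             break
--         rev = rev * 10 + n % 10
--         n = n // 10
--     return rev == num
-- ===== Notes on version B (the rewrite author's own statement) =====
-- stated objective: alternative
-- what changed: Replaces the digit-list plus two-pointer palindrome scan with a reversed-number integer accumulator compared against the original; no list is built.
import Mathlib
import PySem

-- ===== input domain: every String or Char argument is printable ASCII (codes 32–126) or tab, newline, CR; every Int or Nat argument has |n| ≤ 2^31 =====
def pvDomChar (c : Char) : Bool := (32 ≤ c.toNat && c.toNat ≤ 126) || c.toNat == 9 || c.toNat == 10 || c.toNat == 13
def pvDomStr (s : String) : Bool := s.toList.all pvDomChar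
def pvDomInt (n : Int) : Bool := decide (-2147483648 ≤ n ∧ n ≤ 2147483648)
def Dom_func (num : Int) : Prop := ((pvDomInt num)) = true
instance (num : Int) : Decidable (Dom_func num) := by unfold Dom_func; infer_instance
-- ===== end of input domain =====

-- B replaces A's digit-list + two-pointer palindrome scan by a reversed-number integer
-- accumulator compared against the original (alternative decomposition, no list built).

-- ===== PORT A =====
-- A's while loop: extract digits (least significant first) into numList;
-- break when num % 10 == 0 and num // 10 == 0.
-- The 'num ≤ 0' branch is only a totality guard: Python diverges there (excluded by Pre_).
def funcLoop (num : Int) (numList : List Int) : List Int :=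
  if PySem.Int.mod num 10 = 0 ∧ PySem.Int.floordiv num 10 = 0 then numList
  else if num ≤ 0 then numList
  else funcLoop (PySem.Int.floordiv num 10) (numList ++ [PySem.Int.mod num 10])
termination_by num.toNat
decreasing_by
  rw [PySem.Int.floordiv_eq_ediv_of_pos (by norm_num)]
  omega

-- A's for loop over range(len(numList)//2) with early break on a mismatch;
-- both indices are in range whenever read, so List.getD is exact for numList[i] / numList[len-1-i].
def palLoop (numList : List Int) (i : Nat) : Bool :=
  if i < numList.length / 2 then
    if numList.getD i 0 ≠ numList.getD (numList.length - 1 - i) 0 then false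
    else palLoop numList (i + 1)
  else true
termination_by numList.length / 2 - i

def func (num : Int) : Bool := palLoop (funcLoop num []) 0

-- ===== PORT B =====
-- B's while loop: reversed-number accumulator, same break condition as A
-- (the 'n ≤ 0' branch is again only the totality guard for the diverging negatives).
def revLoop (n : Int) (rev : Int) : Int :=
  if PySem.Int.mod n 10 = 0 ∧ PySem.Int.floordiv n 10 = 0 then rev
  else if n ≤ 0 then rev
  else revLoop (PySem.Int.floordiv n 10) (rev * 10 + PySem.Int.mod n 10)
termination_by n.toNat
decreasing_by
  rw [PySem.Int.floordiv_eq_ediv_of_pos (by norm_num)]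
  omega

def func_alt (num : Int) : Bool := revLoop num 0 == num

-- ===== PRECONDITION & SPEC =====
-- Pre_ excludes negative num, on which A's while loop (and B's) never terminates.
def Pre_func (num : Int) : Prop := 0 ≤ num
instance (num : Int) : Decidable (Pre_func num) := by unfold Pre_func; infer_instance
def pvWitness_func : Int := 121

def Spec_func (num : Int) (out : Bool) : Prop := out = func_alt num
instance (num : Int) (out : Bool) : Decidable (Spec_func num out) := by unfold Spec_func; infer_instance

-- ===== CLAIM (what is proved, stated in full; the proofs are below) =====
def Claim_equal_func : Prop := ∀ (num : Int), Dom_func num → Pre_func num → Spec_func num (func num)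

-- ===== LEMMAS AND PROOFS =====

theorem mod10 (a : Int) : PySem.Int.mod a 10 = a % 10 :=
  PySem.Int.mod_eq_emod_of_pos (by norm_num)

theorem fdiv10 (a : Int) : PySem.Int.floordiv a 10 = a / 10 :=
  PySem.Int.floordiv_eq_ediv_of_pos (by norm_num)

-- for m > 0 the break condition is false
theorem notbreak (m : Nat) (hm : 0 < m) :
    ¬(PySem.Int.mod (m : Int) 10 = 0 ∧ PySem.Int.floordiv (m : Int) 10 = 0) := by
  rw [mod10, fdiv10]; intro ⟨h1, h2⟩; omega

-- A's while loop appends exactly the base-10 digits of m, least significant first.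
theorem funcLoop_eq (m : Nat) : ∀ acc : List Int,
    funcLoop (m : Int) acc = acc ++ (Nat.digits 10 m).map (Nat.cast) := by
  induction m using Nat.strong_induction_on with
  | _ m ih =>
    intro acc
    rcases Nat.eq_zero_or_pos m with h0 | hm
    · subst h0; rw [funcLoop]; simp
    · rw [funcLoop, if_neg (notbreak m hm), if_neg (by omega)]
      have hd : PySem.Int.floordiv (m : Int) 10 = ((m / 10 : Nat) : Int) := by rw [fdiv10]; omega
      have hmo : PySem.Int.mod (m : Int) 10 = ((m % 10 : Nat) : Int) := by rw [mod10]; omega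
      rw [hd, hmo, ih (m / 10) (by omega)]
      rw [Nat.digits_def' (by norm_num : 2 ≤ 10) hm]
      simp

-- B's loop computes rev * 10^len + the number whose digits are m's digits reversed.
theorem revLoop_eq (m : Nat) : ∀ rev : Int,
    revLoop (m : Int) rev
      = rev * 10 ^ (Nat.digits 10 m).length
        + ((Nat.ofDigits 10 (Nat.digits 10 m).reverse : Nat) : Int) := by
  induction m using Nat.strong_induction_on with
  | _ m ih =>
    intro rev
    rcases Nat.eq_zero_or_pos m with h0 | hm
    · subst h0; rw [revLoop]; simp
    · rw [revLoop, if_neg (notbreak m hm), if_neg (by omega)]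
      have hd : PySem.Int.floordiv (m : Int) 10 = ((m / 10 : Nat) : Int) := by rw [fdiv10]; omega
      have hmo : PySem.Int.mod (m : Int) 10 = ((m % 10 : Nat) : Int) := by rw [mod10]; omega
      rw [hd, hmo, ih (m / 10) (by omega)]
      rw [Nat.digits_def' (by norm_num : 2 ≤ 10) hm]
      simp only [List.length_cons, List.reverse_cons, Nat.ofDigits_append,
        Nat.ofDigits_singleton, List.length_reverse]
      push_cast
      ring

-- the two-pointer scan from index i checks all remaining index pairs
theorem palLoop_iff (L : List Int) : ∀ (k i : Nat), L.length / 2 - i = k →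
    (palLoop L i = true ↔
      ∀ j, i ≤ j → j < L.length / 2 → L.getD j 0 = L.getD (L.length - 1 - j) 0) := by
  intro k
  induction k with
  | zero =>
    intro i hk
    rw [palLoop, if_neg (by omega)]
    constructor
    · intro _ j hij hj; omega
    · intro _; rfl
  | succ k ih =>
    intro i hk
    have hi : i < L.length / 2 := by omega
    rw [palLoop, if_pos hi]
    by_cases hne : L.getD i 0 ≠ L.getD (L.length - 1 - i) 0
    · rw [if_pos hne]
      constructor
      · intro h; exact absurd h (by simp)
      · intro h; exact absurd (h i le_rfl hi) hne
    · rw [if_neg hne]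
      rw [ne_eq, not_not] at hne
      rw [ih (i + 1) (by omega)]
      constructor
      · intro h j hij hj
        rcases Nat.eq_or_lt_of_le hij with rfl | hlt
        · exact hne
        · exact h j hlt hj
      · intro h j hij hj; exact h j (by omega) hj

-- checking the first half of the index pairs decides list palindromicity
theorem half_iff (L : List Int) :
    (∀ j, j < L.length / 2 → L.getD j 0 = L.getD (L.length - 1 - j) 0) ↔ L.reverse = L := by
  constructor
  · intro h
    apply List.ext_getElem (by simp)
    intro i h1 h2
    rw [List.getElem_reverse]
    rcases lt_or_ge i (L.length / 2) with hi | hi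
    · have hh := h i hi
      rw [List.getD_eq_getElem L 0 (by omega), List.getD_eq_getElem L 0 (by omega)] at hh
      exact hh.symm
    · by_cases he : L.length - 1 - i = i
      · simp only [he]
      · have hj : L.length - 1 - i < L.length / 2 := by omega
        have hh := h _ hj
        have h2' : L.length - 1 - (L.length - 1 - i) = i := by omega
        rw [h2'] at hh
        rw [List.getD_eq_getElem L 0 (by omega), List.getD_eq_getElem L 0 (by omega)] at hh
        exact hh
  · intro hp j hj
    have key : L.reverse[j]? = L[L.length - 1 - j]? :=
      List.getElem?_reverse (by omega)
    rw [hp] at key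
    rw [List.getD_eq_getElem?_getD, List.getD_eq_getElem?_getD, key]

theorem palLoop_zero (L : List Int) : palLoop L 0 = decide (L.reverse = L) := by
  have h := palLoop_iff L (L.length / 2) 0 (by omega)
  simp only [Nat.zero_le, true_implies] at h
  by_cases hp : L.reverse = L
  · simp only [hp, decide_true]
    exact h.mpr (fun j hj => (half_iff L).mpr hp j hj)
  · simp only [hp, decide_false]
    rw [← Bool.not_eq_true]
    intro hc
    exact hp ((half_iff L).mp (fun j hj => h.mp hc j hj))

theorem func_main (num : Int) (hpre : 0 ≤ num) : func num = func_alt num := by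
  lift num to ℕ using hpre with m
  unfold func func_alt
  rw [funcLoop_eq, palLoop_zero, revLoop_eq]
  simp only [List.nil_append, zero_mul, zero_add]
  rw [Bool.eq_iff_iff]
  simp only [decide_eq_true_eq, beq_iff_eq]
  have hmapiff : ((Nat.digits 10 m).map (Nat.cast : ℕ → ℤ)).reverse
      = (Nat.digits 10 m).map (Nat.cast : ℕ → ℤ) ↔ (Nat.digits 10 m).reverse = Nat.digits 10 m := by
    rw [← List.map_reverse]
    exact ⟨fun h => List.map_injective_iff.mpr Nat.cast_injective h, fun h => by rw [h]⟩
  have hnum : Nat.ofDigits 10 (Nat.digits 10 m).reverse = m ↔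
      (Nat.digits 10 m).reverse = Nat.digits 10 m := by
    constructor
    · intro h
      exact Nat.ofDigits_inj_of_len_eq (by norm_num) (by simp)
        (fun d hd => Nat.digits_lt_base (by norm_num) (List.mem_reverse.mp hd))
        (fun d hd => Nat.digits_lt_base (by norm_num) hd)
        (by rw [h, Nat.ofDigits_digits])
    · intro h; rw [h, Nat.ofDigits_digits]
  rw [hmapiff, Nat.cast_inj]
  exact hnum.symm

-- ===== VERDICT (by name: the statement is the Claim_ definition above) =====
theorem func_spec : Claim_equal_func := by
  intro num _ hpre
  exact func_main num hpre
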